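-- pv_equiv track=rewrite | github.com/JeonYoungSeo/Algorithm | Algospot/ClockSync_BF.py | click_mintime
-- ===== SOURCE A (Python) =====
-- num_switch = 10
--
-- clockswitch = [
--     [1, 1, 1, 0, 0, 0, 0, 0, 0, 0, 0, 0, 0, 0, 0, 0],
--     [0, 0, 0, 1, 0, 0, 0, 1, 0, 1, 0, 1, 0, 0, 0, 0],
--     [0, 0, 0, 0, 1, 0, 0, 0, 0, 0, 1, 0, 0, 0, 1, 1],
--     [1, 0, 0, 0, 1, 1, 1, 1, 0, 0, 0, 0, 0, 0, 0, 0],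
--     [0, 0, 0, 0, 0, 0, 1, 1, 1, 0, 1, 0, 1, 0, 0, 0],
--     [1, 0, 1, 0, 0, 0, 0, 0, 0, 0, 0, 0, 0, 0, 1, 1],
--     [0, 0, 0, 1, 0, 0, 0, 0, 0, 0, 0, 0, 0, 0, 1, 1],
--     [0, 0, 0, 0, 1, 1, 0, 1, 0, 0, 0, 0, 0, 0, 1, 1],
--     [0, 1, 1, 1, 1, 1, 0, 0, 0, 0, 0, 0, 0, 0, 0, 0],
--     [0, 0, 0, 1, 1, 1, 0, 0, 0, 1, 0, 0, 0, 1, 0, 0]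
-- ]
--
-- def isSync(clock) :
--     check = 1
--     for i in range(len(clock)) :
--         if clock[i] != 12 :
--             check = 0
--             break
--     return check
--
-- def clicked_siwtch(clock,switch) :
--     for i in range(len(clock)) :
--         if clockswitch[switch][i] == 1 :
--             clock[i] += 3
--             if clock[i] == 15 :
--                 clock[i] = 3
--
-- def click_mintime(clock, switch) :
--     if switch == num_switch :
--         if isSync(clock) == 1 :
--             return 0
--         else :
--             return 987654321
--
--     ret = 987654321
--
--     for click in range(4) :
--
--         ret = min(ret, click + click_mintime(clock, switch+1))
--         clicked_siwtch(clock,switch)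
--
--     return ret
-- ===== SOURCE B (Python) =====
-- # Non-recursive, non-mutating re-implementation: enumerates the leaves of A's DFS
-- # directly.  At leaf number k (row-major order), switch switch+j has been pressed
-- # exactly k // 4**(n-1-j) times, and a cell's value after m presses has a closed
-- # form, so each leaf state is computed arithmetically from the untouched input.
-- num_switch = 10
--
-- clockswitch = [
--     [1, 1, 1, 0, 0, 0, 0, 0, 0, 0, 0, 0, 0, 0, 0, 0],
--     [0, 0, 0, 1, 0, 0, 0, 1, 0, 1, 0, 1, 0, 0, 0, 0],
--     [0, 0, 0, 0, 1, 0, 0, 0, 0, 0, 1, 0, 0, 0, 1, 1],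
--     [1, 0, 0, 0, 1, 1, 1, 1, 0, 0, 0, 0, 0, 0, 0, 0],
--     [0, 0, 0, 0, 0, 0, 1, 1, 1, 0, 1, 0, 1, 0, 0, 0],
--     [1, 0, 1, 0, 0, 0, 0, 0, 0, 0, 0, 0, 0, 0, 1, 1],
--     [0, 0, 0, 1, 0, 0, 0, 0, 0, 0, 0, 0, 0, 0, 1, 1],
--     [0, 0, 0, 0, 1, 1, 0, 1, 0, 0, 0, 0, 0, 0, 1, 1],
--     [0, 1, 1, 1, 1, 1, 0, 0, 0, 0, 0, 0, 0, 0, 0, 0],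
--     [0, 0, 0, 1, 1, 1, 0, 0, 0, 1, 0, 0, 0, 1, 0, 0]
-- ]
--
--
-- def _press_many(v, m):
--     """Value of one clock cell after m presses (a press adds 3, wrapping 15 to 3)."""
--     if v % 3 == 0 and v <= 12:
--         d = (12 - v) // 3          # presses until the cell first shows 12
--         if m <= d:
--             return v + 3 * m
--         return 3 + 3 * ((m - d - 1) % 4)
--     return v + 3 * m
--
--
-- def click_mintime(clock, switch):
--     n = num_switch - switch
--     # divisors extracting, from a leaf number k, the press count of each switch
--     # that drives clock cell i
--     cell_divs = [[4 ** (n - 1 - j) for j in range(n) if clockswitch[switch + j][i] == 1]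
--                  for i in range(len(clock))]
--     best = 987654321
--     for k in range(4 ** n):
--         synced = True
--         for i in range(len(clock)):
--             m = 0
--             for d in cell_divs[i]:
--                 m += k // d
--             if _press_many(clock[i], m) != 12:
--                 synced = False
--                 break
--         if synced:
--             cost = 0
--             kk = k
--             while kk:
--                 cost += kk % 4
--                 kk //= 4
--             best = min(best, cost)
--     return best
-- ===== Notes on version B (the rewrite author's own statement) =====
-- stated objective: alternative
-- what changed: Replaces the state-mutating recursive DFS by a flat enumeration of leaf indices k < 4**(10-switch): switch switch+j has been pressed exactly k//4**(n-1-j) times when the DFS visits leaf k, and a cell's value after m presses has a closed form, so every visited configuration is computed arithmetically from the untouched input without recursion or mutation.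
import Mathlib
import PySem

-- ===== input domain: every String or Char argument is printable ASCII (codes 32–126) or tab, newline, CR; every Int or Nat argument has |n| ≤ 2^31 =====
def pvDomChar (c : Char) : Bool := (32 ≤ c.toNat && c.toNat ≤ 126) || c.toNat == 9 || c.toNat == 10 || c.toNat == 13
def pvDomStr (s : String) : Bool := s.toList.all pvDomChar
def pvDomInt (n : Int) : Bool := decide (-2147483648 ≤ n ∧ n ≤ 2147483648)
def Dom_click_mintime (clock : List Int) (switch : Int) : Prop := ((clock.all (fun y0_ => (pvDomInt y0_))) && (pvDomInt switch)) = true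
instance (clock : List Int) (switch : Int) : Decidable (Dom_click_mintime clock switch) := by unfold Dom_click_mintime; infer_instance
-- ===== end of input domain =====

-- B replaces A's state-mutating recursive DFS by a flat arithmetic enumeration of the
-- DFS leaves (A mutates its `clock` argument in place; B does not — the equivalence
-- proved here is about the RETURN value only).


-- the module constant `clockswitch` (shared by both programs)
def clockswitchL : List (List Int) := [
  [1, 1, 1, 0, 0, 0, 0, 0, 0, 0, 0, 0, 0, 0, 0, 0],
  [0, 0, 0, 1, 0, 0, 0, 1, 0, 1, 0, 1, 0, 0, 0, 0],
  [0, 0, 0, 0, 1, 0, 0, 0, 0, 0, 1, 0, 0, 0, 1, 1],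
  [1, 0, 0, 0, 1, 1, 1, 1, 0, 0, 0, 0, 0, 0, 0, 0],
  [0, 0, 0, 0, 0, 0, 1, 1, 1, 0, 1, 0, 1, 0, 0, 0],
  [1, 0, 1, 0, 0, 0, 0, 0, 0, 0, 0, 0, 0, 0, 1, 1],
  [0, 0, 0, 1, 0, 0, 0, 0, 0, 0, 0, 0, 0, 0, 1, 1],
  [0, 0, 0, 0, 1, 1, 0, 1, 0, 0, 0, 0, 0, 0, 1, 1],
  [0, 1, 1, 1, 1, 1, 0, 0, 0, 0, 0, 0, 0, 0, 0, 0],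
  [0, 0, 0, 1, 1, 1, 0, 0, 0, 1, 0, 0, 0, 1, 0, 0]]

-- ===== PORT A =====

-- `clock[i] += 3; if clock[i] == 15: clock[i] = 3` on one cell
def pressCellA (v : Int) : Int := if v + 3 = 15 then 3 else v + 3

-- `isSync`: the indexed loop with break, as a structural scan
def isSyncA : List Int → Int
  | [] => 1
  | v :: vs => if v ≠ 12 then 0 else isSyncA vs

-- `clicked_siwtch`'s loop: walks the clock consuming the switch row in step
-- (exact for len(clock) ≤ 16 = row length, which Pre_ guarantees; Python raises beyond)
def pressRowA : List Int → List Int → List Int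
  | [], _ => []
  | v :: vs, row => (if row.headD 0 = 1 then pressCellA v else v) :: pressRowA vs row.tail

def clickedSwitchA (clock : List Int) (switch : Int) : List Int :=
  pressRowA clock ((PySem.List.pyGet? clockswitchL switch).getD [])

-- the recursion of A, with the mutation of `clock` made explicit as threaded state;
-- fuel = recursion depth 10 - switch (exact under Pre_: Python diverges for switch > 10)
def clickAuxA : Nat → List Int → Int → Int × List Int
  | 0, clock, switch =>
    if switch = 10 then (if isSyncA clock = 1 then (0 : Int) else 987654321, clock)
    else (987654321, clock)   -- fuel exhausted: unreachable under Pre_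
  | f + 1, clock, switch =>
    if switch = 10 then (if isSyncA clock = 1 then (0 : Int) else 987654321, clock)
    else
      (PySem.List.pyRange 0 4 1).foldl
        (fun st click =>
          let r := clickAuxA f st.2 (switch + 1)
          (min st.1 (click + r.1), clickedSwitchA r.2 switch))
        (987654321, clock)

def click_mintime (clock : List Int) (switch : Int) : Int :=
  (clickAuxA (10 - switch).toNat clock switch).1

-- ===== PORT B =====

-- clockswitch[t][i] (defaults are never used under Pre_, where both indexings are in range)
def rowValB (t : Int) (i : Int) : Int :=
  (PySem.List.pyGet? ((PySem.List.pyGet? clockswitchL t).getD []) i).getD 0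

-- `_press_many`: value of one cell after m presses, in closed form
def pressManyB (v : Int) (m : Int) : Int :=
  if PySem.Int.mod v 3 = 0 ∧ v ≤ 12 then
    if m ≤ PySem.Int.floordiv (12 - v) 3 then v + 3 * m
    else 3 + 3 * PySem.Int.mod (m - PySem.Int.floordiv (12 - v) 3 - 1) 4
  else v + 3 * m

-- the `cell_divs` comprehension: for each clock cell i, the divisors 4**(n-1-j) of the
-- switches j that drive it
def cellDivsB (switch : Int) (n : Nat) (clock : List Int) : List (List Int) :=
  (PySem.List.pyRange 0 (clock.length : Int) 1).map (fun i =>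
    ((PySem.List.pyRange 0 (n : Int) 1).filter
        (fun j => decide (rowValB (switch + j) i = 1))).map
      (fun j => (4 : Int) ^ (n - 1 - j.toNat)))

-- the `for i in range(len(clock))` loop with break, walking the clock and its
-- divisor lists in step
def syncAuxB : List Int → List (List Int) → Int → Bool
  | [], _, _ => true
  | v :: vs, divs, k =>
    let m := (divs.headD []).foldl (fun m d => m + PySem.Int.floordiv k d) 0
    if pressManyB v m ≠ 12 then false else syncAuxB vs divs.tail k

-- the `while kk:` digit-sum loop (hand-ported; exact since k from range(4**n) is ≥ 0)
def costLoopB (kk : Nat) : Int :=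
  if h : kk = 0 then 0 else ((kk % 4 : Nat) : Int) + costLoopB (kk / 4)
decreasing_by exact Nat.div_lt_self (Nat.pos_of_ne_zero h) (by norm_num)

def click_mintime_alt (clock : List Int) (switch : Int) : Int :=
  let n : Nat := (10 - switch).toNat   -- `4 ** n`: exact for switch ≤ 10 (Pre_)
  let divs := cellDivsB switch n clock
  (PySem.List.pyRange 0 ((4 ^ n : Nat) : Int) 1).foldl
    (fun best k => if syncAuxB clock divs k then min best (costLoopB k.toNat) else best)
    987654321

-- ===== PRECONDITION & SPEC =====

-- Pre_ is exactly where Python A returns: switch > 10 diverges (unbounded recursion),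
-- switch < -10 raises IndexError, and switch < 10 with len(clock) > 16 raises IndexError.
def Pre_click_mintime (clock : List Int) (switch : Int) : Prop :=
  (-10 ≤ switch ∧ switch ≤ 10) ∧ (switch = 10 ∨ clock.length ≤ 16)
instance (clock : List Int) (switch : Int) : Decidable (Pre_click_mintime clock switch) := by
  unfold Pre_click_mintime; infer_instance

def pvWitness_click_mintime : List Int × Int := ([3, 9, 12], 8)

def Spec_click_mintime (clock : List Int) (switch : Int) (out : Int) : Prop := out = click_mintime_alt clock switch
instance (clock : List Int) (switch : Int) (out : Int) : Decidable (Spec_click_mintime clock switch out) := by unfold Spec_click_mintime; infer_instance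

-- ===== CLAIM (what is proved, stated in full; the proofs are below) =====
def Claim_equal_click_mintime : Prop := ∀ (clock : List Int) (switch : Int), Dom_click_mintime clock switch → Pre_click_mintime clock switch → Spec_click_mintime clock switch (click_mintime clock switch)

-- ===== LEMMAS AND PROOFS =====

-- ---- spec-side model: per-cell press counts ----

-- apply `pressCellA` to cell i exactly `c i` times
def applyCnt (c : Nat → Nat) : List Int → List Int
  | [] => []
  | v :: vs => pressCellA^[c 0] v :: applyCnt (fun i => c (i + 1)) vs

-- number of presses of switch s+j (j < n) before the DFS visits leaf k, summed per cell i
def cntF : Int → Nat → Nat → Nat → Nat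
  | _, 0, _, _ => 0
  | s, n + 1, k, i => (if rowValB s (i : Int) = 1 then k / 4 ^ n else 0) + cntF (s + 1) n k i

-- base-4 digit sum of k (with n digits)
def bsum : Nat → Nat → Nat
  | 0, _ => 0
  | n + 1, k => k / 4 ^ n % 4 + bsum n k

-- the common value: minimum cost over all 4^n leaves
def leafFold (n : Nat) (s : Int) (clock : List Int) : Int :=
  (List.range (4 ^ n)).foldl
    (fun b k => if (applyCnt (cntF s n k) clock).all (· = 12) then min b ((bsum n k : Nat) : Int) else b)
    987654321

theorem isSyncA_eq (l : List Int) : isSyncA l = if l.all (· = 12) then 1 else 0 := by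
  induction l with
  | nil => simp [isSyncA]
  | cons v vs ih =>
    by_cases h : v = 12 <;> simp [isSyncA, h, ih]

theorem applyCnt_congr (c d : Nat → Nat) (l : List Int) (h : ∀ i, c i = d i) :
    applyCnt c l = applyCnt d l := by
  induction l generalizing c d with
  | nil => rfl
  | cons v vs ih => simp [applyCnt, h 0, ih (fun i => c (i + 1)) (fun i => d (i + 1)) (fun i => h (i + 1))]

theorem applyCnt_zero (c : Nat → Nat) (l : List Int) (h : ∀ i, c i = 0) : applyCnt c l = l := by
  induction l generalizing c with
  | nil => rfl
  | cons v vs ih => simp [applyCnt, h 0, ih (fun i => c (i + 1)) (fun i => h (i + 1))]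

theorem applyCnt_add (c d : Nat → Nat) (l : List Int) :
    applyCnt c (applyCnt d l) = applyCnt (fun i => d i + c i) l := by
  induction l generalizing c d with
  | nil => rfl
  | cons v vs ih =>
    simp only [applyCnt, List.cons.injEq]
    refine ⟨?_, ih _ _⟩
    rw [Nat.add_comm]
    exact (Function.iterate_add_apply _ _ _ _).symm

theorem pressRow_eq (l row : List Int) :
    pressRowA l row =
      applyCnt (fun i => if (PySem.List.pyGet? row (i : Int)).getD 0 = 1 then 1 else 0) l := by
  induction l generalizing row with
  | nil => rfl
  | cons v vs ih =>
    simp only [pressRowA, applyCnt, List.cons.injEq]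
    constructor
    · have hh : row.headD 0 = (PySem.List.pyGet? row ((0 : Nat) : Int)).getD 0 := by
        cases row <;> simp [PySem.List.pyGet?_zero_cons, PySem.List.pyGet?, PySem.List.pyIdx?]
      rw [← hh]
      by_cases h : row.headD 0 = 1 <;>
        simp [List.headD_eq_head?_getD] at h <;> simp [List.headD_eq_head?_getD, h]
    · rw [ih row.tail]
      apply applyCnt_congr
      intro i
      have : PySem.List.pyGet? row.tail (i : Int) = PySem.List.pyGet? row ((i + 1 : Nat) : Int) := by
        cases row with
        | nil => simp [PySem.List.pyGet?, PySem.List.pyIdx?]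
        | cons r rs =>
          rw [PySem.List.pyGet?_natCast, PySem.List.pyGet?_natCast]
          simp
      rw [this]

theorem clickedSwitch_eq (l : List Int) (s : Int) :
    clickedSwitchA l s = applyCnt (fun i => if rowValB s (i : Int) = 1 then 1 else 0) l := by
  unfold clickedSwitchA rowValB
  exact pressRow_eq l _

theorem cntF_zero (n : Nat) (s : Int) (i : Nat) : cntF s n 0 i = 0 := by
  induction n generalizing s with
  | zero => rfl
  | succ n ih => simp [cntF, Nat.zero_div, ih]

theorem cntF_lin (n : Nat) (s : Int) (a k i : Nat) :
    cntF s n (a * 4 ^ n + k) i = a * cntF s n (4 ^ n) i + cntF s n k i := by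
  induction n generalizing s a k with
  | zero => simp [cntF]
  | succ n ih =>
    have hd : (a * 4 ^ (n + 1) + k) / 4 ^ n = k / 4 ^ n + a * 4 := by
      rw [pow_succ]
      rw [show a * (4 ^ n * 4) + k = k + (a * 4) * 4 ^ n by ring]
      rw [Nat.add_mul_div_right _ _ (show 0 < 4 ^ n by positivity)]
    have hd2 : (4 : Nat) ^ (n + 1) / 4 ^ n = 4 := by
      rw [pow_succ, Nat.mul_div_cancel_left]
      positivity
    have ht : cntF (s + 1) n (a * 4 ^ (n + 1) + k) i
        = a * 4 * cntF (s + 1) n (4 ^ n) i + cntF (s + 1) n k i := by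
      rw [show a * 4 ^ (n + 1) + k = (a * 4) * 4 ^ n + k by ring]
      exact ih (s + 1) (a * 4) k
    have hp : cntF (s + 1) n (4 ^ (n + 1)) i = 4 * cntF (s + 1) n (4 ^ n) i := by
      have := ih (s + 1) 4 0
      rw [show (4 : Nat) * 4 ^ n + 0 = 4 ^ (n + 1) by ring] at this
      rw [this, cntF_zero]
      omega
    simp only [cntF, hd, hd2, ht, hp]
    by_cases h : rowValB s (i : Int) = 1 <;> simp [h] <;> ring

theorem cntF_pow_succ (N : Nat) (s : Int) (m i : Nat) (h : N ≤ m + 1) :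
    cntF s N (4 ^ (m + 1)) i = 4 * cntF s N (4 ^ m) i := by
  induction N generalizing s with
  | zero => simp [cntF]
  | succ N ih =>
    have hN : N ≤ m := by omega
    have hd : (4 : Nat) ^ (m + 1) / 4 ^ N = 4 * (4 ^ m / 4 ^ N) := by
      rw [Nat.pow_div hN (by norm_num), Nat.pow_div (by omega) (by norm_num)]
      rw [show m + 1 - N = (m - N) + 1 by omega, pow_succ]
      ring
    simp only [cntF, hd, ih (s + 1) (by omega)]
    by_cases hr : rowValB s (i : Int) = 1 <;> simp [hr] <;> ring

theorem bsum_high (n : Nat) (a k : Nat) : bsum n (a * 4 ^ n + k) = bsum n k := by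
  induction n generalizing a k with
  | zero => rfl
  | succ n ih =>
    have hd : (a * 4 ^ (n + 1) + k) / 4 ^ n % 4 = k / 4 ^ n % 4 := by
      rw [pow_succ, show a * (4 ^ n * 4) + k = k + (a * 4) * 4 ^ n by ring,
        Nat.add_mul_div_right _ _ (show 0 < 4 ^ n by positivity)]
      omega
    have ht : bsum n (a * 4 ^ (n + 1) + k) = bsum n k := by
      rw [show a * 4 ^ (n + 1) + k = (a * 4) * 4 ^ n + k by ring]
      exact ih (a * 4) k
    simp [bsum, hd, ht]

theorem bsum_split (n : Nat) (a k : Nat) (ha : a < 4) (hk : k < 4 ^ n) :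
    bsum (n + 1) (a * 4 ^ n + k) = a + bsum n k := by
  have hd : (a * 4 ^ n + k) / 4 ^ n % 4 = a := by
    rw [show a * 4 ^ n + k = k + a * 4 ^ n by ring,
      Nat.add_mul_div_right _ _ (show 0 < 4 ^ n by positivity), Nat.div_eq_of_lt hk]
    omega
  simp [bsum, hd, bsum_high]

-- ---- generic min-fold lemmas ----

theorem foldl_minif_min (l : List Nat) (P : Nat → Bool) (F : Nat → Int) (x y : Int) :
    l.foldl (fun b k => if P k then min b (F k) else b) (min x y)
      = min x (l.foldl (fun b k => if P k then min b (F k) else b) y) := by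
  induction l generalizing y with
  | nil => rfl
  | cons k l ih =>
    simp only [List.foldl_cons]
    have hstep : (if P k then min (min x y) (F k) else min x y)
        = min x (if P k then min y (F k) else y) := by
      by_cases h : P k <;> simp [h, min_assoc]
    rw [hstep, ih]

theorem foldl_minif_add (l : List Nat) (P : Nat → Bool) (F : Nat → Int) (c x : Int) :
    l.foldl (fun b k => if P k then min b (c + F k) else b) (c + x)
      = c + l.foldl (fun b k => if P k then min b (F k) else b) x := by
  induction l generalizing x with
  | nil => rfl
  | cons k l ih =>
    simp only [List.foldl_cons]
    have hstep : (if P k then min (c + x) (c + F k) else c + x)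
        = c + (if P k then min x (F k) else x) := by
      by_cases h : P k <;> simp [h] <;> omega
    rw [hstep, ih]

theorem block_eq (l : List Nat) (P : Nat → Bool) (F : Nat → Int) (b c : Int)
    (hb : b ≤ c + 987654321) :
    l.foldl (fun b k => if P k then min b (c + F k) else b) b
      = min b (c + l.foldl (fun b k => if P k then min b (F k) else b) 987654321) := by
  conv_lhs => rw [show b = min b (c + 987654321) from (min_eq_left hb).symm]
  rw [foldl_minif_min l P (fun k => c + F k) b (c + 987654321), foldl_minif_add]

-- ---- A-side characterisation ----

theorem pyRange04 : PySem.List.pyRange 0 4 1 = [0, 1, 2, 3] := by decide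

theorem cntF_pow_self (n : Nat) (s : Int) (i : Nat) :
    cntF s (n + 1) (4 ^ n) i
      = (if rowValB s (i : Int) = 1 then 1 else 0) + cntF (s + 1) n (4 ^ n) i := by
  simp [cntF, Nat.div_self (show 0 < 4 ^ n by positivity)]

theorem cntF_block (n : Nat) (s : Int) (a k i : Nat) (hk : k < 4 ^ n) :
    cntF s (n + 1) (a * 4 ^ n + k) i
      = a * cntF s (n + 1) (4 ^ n) i + cntF (s + 1) n k i := by
  have hd : (a * 4 ^ n + k) / 4 ^ n = a := by
    rw [show a * 4 ^ n + k = k + a * 4 ^ n by ring,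
      Nat.add_mul_div_right _ _ (show 0 < 4 ^ n by positivity), Nat.div_eq_of_lt hk]
    omega
  have ht := cntF_lin n (s + 1) a k i
  simp only [cntF, hd, ht]
  by_cases h : rowValB s (i : Int) = 1 <;> simp [h] <;> ring

theorem leafFold_succ (n : Nat) (s : Int) (clock : List Int) :
    leafFold (n + 1) s clock =
      [0, 1, 2, 3].foldl
        (fun r (a : Nat) => min r ((a : Int) +
          leafFold n (s + 1) (applyCnt (fun i => a * cntF s (n + 1) (4 ^ n) i) clock)))
        987654321 := by
  have hblock : ∀ (a : Nat) (b : Int), a < 4 → b ≤ (a : Int) + 987654321 →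
      (List.range (4 ^ n)).foldl
        (fun b k => if (applyCnt (cntF s (n + 1) (a * 4 ^ n + k)) clock).all (· = 12)
          then min b ((bsum (n + 1) (a * 4 ^ n + k) : Nat) : Int) else b) b
      = min b ((a : Int) + leafFold n (s + 1)
          (applyCnt (fun i => a * cntF s (n + 1) (4 ^ n) i) clock)) := by
    intro a b ha hb
    have hcong : ∀ (acc : Int), ∀ k ∈ List.range (4 ^ n),
        (if (applyCnt (cntF s (n + 1) (a * 4 ^ n + k)) clock).all (· = 12)
          then min acc ((bsum (n + 1) (a * 4 ^ n + k) : Nat) : Int) else acc)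
        = (if (applyCnt (cntF (s + 1) n k)
              (applyCnt (fun i => a * cntF s (n + 1) (4 ^ n) i) clock)).all (· = 12)
          then min acc ((a : Int) + ((bsum n k : Nat) : Int)) else acc) := by
      intro acc k hk
      rw [List.mem_range] at hk
      have h1 : applyCnt (cntF (s + 1) n k)
            (applyCnt (fun i => a * cntF s (n + 1) (4 ^ n) i) clock)
          = applyCnt (cntF s (n + 1) (a * 4 ^ n + k)) clock := by
        rw [applyCnt_add]
        exact (applyCnt_congr _ _ clock (fun i => cntF_block n s a k i hk)).symm
      have h2 : ((bsum (n + 1) (a * 4 ^ n + k) : Nat) : Int)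
          = (a : Int) + ((bsum n k : Nat) : Int) := by
        rw [bsum_split n a k ha hk]; push_cast; ring
      rw [h1, h2]
    rw [PySem.List.foldl_congr_mem _ _ _ _ hcong]
    rw [block_eq _ _ _ b (a : Int) hb]
    rfl
  conv_lhs => rw [leafFold]
  rw [show 4 ^ (n + 1) = 4 ^ n + (4 ^ n + (4 ^ n + 4 ^ n)) by ring]
  rw [List.range_add, List.range_add, List.range_add]
  simp only [List.map_append, List.map_map, List.foldl_append, List.foldl_map, Function.comp]
  simp only [← Nat.add_assoc]
  simp only [show 4 ^ n + 4 ^ n = 2 * 4 ^ n from by ring]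
  simp only [show 2 * 4 ^ n + 4 ^ n = 3 * 4 ^ n from by ring]
  simp only [show ∀ k : Nat, 4 ^ n + k = 1 * 4 ^ n + k from fun k => by ring]
  have hzero : ∀ k : Nat, k = 0 * 4 ^ n + k := fun k => by ring
  rw [PySem.List.foldl_congr_mem (List.range (4 ^ n)) _
    (fun (b : Int) k => if (applyCnt (cntF s (n + 1) (0 * 4 ^ n + k)) clock).all (· = 12)
      then min b ((bsum (n + 1) (0 * 4 ^ n + k) : Nat) : Int) else b) 987654321
    (fun acc k _ => by simp only [← hzero k])]
  rw [hblock 0 987654321 (by norm_num) (by norm_num)]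
  rw [hblock 1 _ (by norm_num) (le_trans (min_le_left _ _) (by norm_num))]
  rw [hblock 2 _ (by norm_num) (le_trans (min_le_left _ _) (by norm_num))]
  rw [hblock 3 _ (by norm_num) (le_trans (min_le_left _ _) (by norm_num))]
  simp only [List.foldl_cons, List.foldl_nil]

theorem clickAux_eq (n : Nat) (clock : List Int) :
    clickAuxA n clock (10 - (n : Int)) =
      (leafFold n (10 - (n : Int)) clock, applyCnt (cntF (10 - (n : Int)) n (4 ^ n)) clock) := by
  induction n generalizing clock with
  | zero =>
    simp only [Nat.cast_zero, sub_zero]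
    rw [show clickAuxA 0 clock 10
        = (if isSyncA clock = 1 then (0 : Int) else 987654321, clock) from by simp [clickAuxA]]
    unfold leafFold
    simp only [pow_zero, List.range_one, List.foldl_cons, List.foldl_nil]
    rw [applyCnt_zero (cntF 10 0 0) clock (fun i => rfl),
      applyCnt_zero (cntF 10 0 1) clock (fun i => rfl), isSyncA_eq]
    by_cases h : clock.all (· = 12) <;> simp [h, bsum]
  | succ n ih =>
    have hc : (((n + 1 : Nat)) : Int) = (n : Int) + 1 := by push_cast; ring
    simp only [hc]
    have hns : ¬((10 : Int) - ((n : Int) + 1) = 10) := by omega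
    have harg : (10 : Int) - ((n : Int) + 1) + 1 = 10 - (n : Int) := by ring
    rw [show clickAuxA (n + 1) clock (10 - ((n : Int) + 1))
        = (PySem.List.pyRange 0 4 1).foldl
            (fun st click =>
              let r := clickAuxA n st.2 (10 - ((n : Int) + 1) + 1)
              (min st.1 (click + r.1), clickedSwitchA r.2 (10 - ((n : Int) + 1))))
            (987654321, clock) from by simp [clickAuxA, hns]]
    simp only [harg, pyRange04, List.foldl_cons, List.foldl_nil]
    have hstate0 : clickedSwitchA (applyCnt (cntF (10 - (n : Int)) n (4 ^ n)) clock)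
          (10 - ((n : Int) + 1))
        = applyCnt (fun i => 1 * cntF (10 - ((n : Int) + 1)) (n + 1) (4 ^ n) i) clock := by
      rw [clickedSwitch_eq, applyCnt_add]
      apply applyCnt_congr
      intro i
      have hps := cntF_pow_self n (10 - ((n : Int) + 1)) i
      rw [harg] at hps
      rw [hps]
      by_cases h : rowValB (10 - ((n : Int) + 1)) (i : Int) = 1 <;> simp [h] <;> omega
    have hstate : ∀ a : Nat,
        clickedSwitchA (applyCnt (cntF (10 - (n : Int)) n (4 ^ n))
            (applyCnt (fun i => a * cntF (10 - ((n : Int) + 1)) (n + 1) (4 ^ n) i) clock))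
          (10 - ((n : Int) + 1))
        = applyCnt (fun i => (a + 1) * cntF (10 - ((n : Int) + 1)) (n + 1) (4 ^ n) i) clock := by
      intro a
      rw [clickedSwitch_eq, applyCnt_add, applyCnt_add]
      apply applyCnt_congr
      intro i
      have hps := cntF_pow_self n (10 - ((n : Int) + 1)) i
      rw [harg] at hps
      rw [hps]
      by_cases h : rowValB (10 - ((n : Int) + 1)) (i : Int) = 1 <;> simp [h] <;> ring
    rw [ih clock, hstate0, ih _, hstate 1, ih _, hstate 2, ih _, hstate 3]
    rw [leafFold_succ]
    simp only [List.foldl_cons, List.foldl_nil, harg]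
    simp only [show (1 : Nat) + 1 = 2 from rfl, show (2 : Nat) + 1 = 3 from rfl,
      show (3 : Nat) + 1 = 4 from rfl]
    rw [applyCnt_zero (fun i => 0 * cntF (10 - ((n : Int) + 1)) (n + 1) (4 ^ n) i) clock
      (fun i => by ring)]
    have hfin : applyCnt (cntF (10 - ((n : Int) + 1)) (n + 1) (4 ^ (n + 1))) clock
        = applyCnt (fun i => 4 * cntF (10 - ((n : Int) + 1)) (n + 1) (4 ^ n) i) clock :=
      applyCnt_congr _ _ clock (fun i => cntF_pow_succ (n + 1) _ n i (by omega))
    rw [hfin]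
    norm_num

-- ---- B-side characterisation ----

theorem pressManyB_eq (m : Nat) (v : Int) : pressManyB v (m : Int) = pressCellA^[m] v := by
  have hm3 : PySem.Int.mod v 3 = v % 3 := PySem.Int.mod_eq_emod_of_pos (by norm_num)
  have hfd : PySem.Int.floordiv (12 - v) 3 = (12 - v) / 3 :=
    PySem.Int.floordiv_eq_ediv_of_pos (by norm_num)
  have hm4 : ∀ x : Int, PySem.Int.mod x 4 = x % 4 :=
    fun x => PySem.Int.mod_eq_emod_of_pos (by norm_num)
  induction m with
  | zero =>
    simp only [pressManyB, hm3, hfd, hm4, Function.iterate_zero_apply, Nat.cast_zero]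
    split_ifs <;> omega
  | succ m ih =>
    rw [Function.iterate_succ_apply', ← ih]
    simp only [pressManyB, pressCellA, hm3, hfd, hm4, Nat.cast_succ]
    split_ifs <;> omega

def divList (s : Int) (n : Nat) (i : Nat) : List Int :=
  ((List.range n).filter (fun (j : Nat) => decide (rowValB (s + (j : Int)) (i : Int) = 1))).map
    (fun (j : Nat) => ((4 ^ (n - 1 - j) : Nat) : Int))

theorem bsum_zero (n : Nat) : bsum n 0 = 0 := by
  induction n with
  | zero => rfl
  | succ n ih => simp [bsum, ih]

theorem bsum_low (n k : Nat) : bsum (n + 1) k = k % 4 + bsum n (k / 4) := by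
  induction n generalizing k with
  | zero => simp [bsum]
  | succ n ih =>
    have h1 : bsum (n + 1 + 1) k = k / 4 ^ (n + 1) % 4 + bsum (n + 1) k := rfl
    have h2 : bsum (n + 1) (k / 4) = k / 4 / 4 ^ n % 4 + bsum n (k / 4) := rfl
    have h3 : k / 4 / 4 ^ n = k / 4 ^ (n + 1) := by
      rw [Nat.div_div_eq_div_mul, pow_succ']
    rw [h1, ih k, h2, h3]
    ring

theorem costLoop_eq (n : Nat) : ∀ k : Nat, k < 4 ^ n → costLoopB k = ((bsum n k : Nat) : Int) := by
  induction n with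
  | zero =>
    intro k hk
    have : k = 0 := by simpa using hk
    subst this
    rw [costLoopB]
    simp [bsum]
  | succ n ih =>
    intro k hk
    by_cases hk0 : k = 0
    · subst hk0
      rw [costLoopB]
      simp [bsum_zero]
    · rw [costLoopB, dif_neg hk0]
      have hlt : k / 4 < 4 ^ n := by
        rw [Nat.div_lt_iff_lt_mul (by norm_num)]
        calc k < 4 ^ (n + 1) := hk
        _ = 4 ^ n * 4 := by ring
      rw [ih (k / 4) hlt, bsum_low]
      push_cast
      ring

theorem mAux (k i : Nat) : ∀ (n : Nat) (s : Int) (acc : Int),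
    (divList s n i).foldl (fun m d => m + PySem.Int.floordiv (k : Int) d) acc
      = acc + ((cntF s n k i : Nat) : Int) := by
  intro n
  induction n with
  | zero => intro s acc; simp [divList, cntF]
  | succ n ih =>
    intro s acc
    rw [divList, List.range_succ_eq_map, List.filter_cons]
    have htail : (List.map Nat.succ (List.range n)).filter
          (fun (j : Nat) => decide (rowValB (s + (j : Int)) (i : Int) = 1))
        = List.map Nat.succ ((List.range n).filter
            (fun (j : Nat) => decide (rowValB ((s + 1) + (j : Int)) (i : Int) = 1))) := by
      rw [List.filter_map]
      congr 1
      apply List.filter_congr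
      intro j _
      simp only [Function.comp_apply]
      congr 1
      push_cast
      ring
    rw [htail]
    have hmaps : (List.map Nat.succ ((List.range n).filter
          (fun (j : Nat) => decide (rowValB ((s + 1) + (j : Int)) (i : Int) = 1)))).map
          (fun (j : Nat) => ((4 ^ (n + 1 - 1 - j) : Nat) : Int))
        = divList (s + 1) n i := by
      rw [List.map_map, divList]
      apply List.map_congr_left
      intro j _
      simp only [Function.comp_apply]
      congr 2
      omega
    have hcn : cntF s (n + 1) k i
        = (if rowValB s (i : Int) = 1 then k / 4 ^ n else 0) + cntF (s + 1) n k i := rfl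
    by_cases h : rowValB (s + ((0 : Nat) : Int)) (i : Int) = 1
    · have h' : rowValB s (i : Int) = 1 := by simpa using h
      rw [if_pos (by simpa using h)]
      simp only [List.map_cons, List.foldl_cons, hmaps]
      rw [ih (s + 1)]
      have hfd : PySem.Int.floordiv (k : Int) ((4 ^ (n + 1 - 1 - 0) : Nat) : Int)
          = ((k / 4 ^ n : Nat) : Int) := by
        rw [show n + 1 - 1 - 0 = n from by omega]
        have := PySem.Int.floordiv_natCast k (4 ^ n)
        exact_mod_cast this
      rw [hfd, hcn, if_pos h']
      push_cast
      ring
    · have h' : ¬ rowValB s (i : Int) = 1 := by simpa using h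
      rw [if_neg (by simpa using h)]
      rw [hmaps, ih (s + 1)]
      rw [hcn, if_neg h']
      push_cast
      ring

theorem syncAux_eq (s : Int) (n k : Nat) :
    ∀ (vs : List Int) (i0 : Nat),
      syncAuxB vs ((List.range vs.length).map (fun i => divList s n (i0 + i))) (k : Int)
        = (applyCnt (fun i => cntF s n k (i0 + i)) vs).all (· = 12) := by
  intro vs
  induction vs with
  | nil => intro i0; simp [syncAuxB, applyCnt]
  | cons v vs ihv =>
    intro i0
    rw [List.length_cons, List.range_succ_eq_map, List.map_cons, List.map_map]
    simp only [syncAuxB, List.headD_cons, List.tail_cons, Nat.add_zero]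
    rw [mAux k i0 n s 0, zero_add, pressManyB_eq]
    have htail : (List.range vs.length).map ((fun i => divList s n (i0 + i)) ∘ Nat.succ)
        = (List.range vs.length).map (fun i => divList s n ((i0 + 1) + i)) := by
      apply List.map_congr_left
      intro j _
      simp only [Function.comp_apply]
      congr 1
      omega
    rw [htail, ihv (i0 + 1)]
    simp only [applyCnt, List.all_cons, Nat.add_zero]
    have hsh : applyCnt (fun i => cntF s n k ((i0 + 1) + i)) vs
        = applyCnt (fun i => cntF s n k (i0 + (i + 1))) vs :=
      applyCnt_congr _ _ vs (fun i => by rw [show (i0 + 1) + i = i0 + (i + 1) from by omega])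
    by_cases h : pressCellA^[cntF s n k i0] v = 12 <;> simp [h, hsh]

theorem alt_eq (clock : List Int) (switch : Int) :
    click_mintime_alt clock switch = leafFold ((10 - switch).toNat) switch clock := by
  simp only [click_mintime_alt]
  have hdivs : cellDivsB switch ((10 - switch).toNat) clock
      = (List.range clock.length).map (fun i => divList switch ((10 - switch).toNat) (0 + i)) := by
    rw [cellDivsB]
    simp only [PySem.List.pyRange_zero_natCast, List.map_map]
    apply List.map_congr_left
    intro i _
    simp only [Function.comp_apply, Nat.zero_add]
    rw [List.filter_map, List.map_map, divList]
    apply List.map_congr_left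
    intro j _
    simp only [Function.comp_apply, Int.toNat_natCast]
    push_cast
    ring
  rw [hdivs, PySem.List.pyRange_zero_natCast (4 ^ (10 - switch).toNat), List.foldl_map]
  unfold leafFold
  rw [PySem.List.foldl_congr_mem _ _
    (fun (b : Int) (kk : Nat) =>
      if (applyCnt (cntF switch ((10 - switch).toNat) kk) clock).all (· = 12)
        then min b ((bsum ((10 - switch).toNat) kk : Nat) : Int) else b) 987654321
    (by
      intro acc kk hkk
      rw [List.mem_range] at hkk
      have hsync := syncAux_eq switch ((10 - switch).toNat) kk clock 0
      rw [hsync]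
      rw [applyCnt_congr (fun i => cntF switch ((10 - switch).toNat) kk (0 + i))
        (cntF switch ((10 - switch).toNat) kk) clock (fun i => by simp)]
      rw [Int.toNat_natCast, costLoop_eq ((10 - switch).toNat) kk hkk])]

-- ===== VERDICT (by name: the statement is the Claim_ definition above) =====
theorem click_mintime_spec : Claim_equal_click_mintime := by
  intro clock switch _ hpre
  unfold Spec_click_mintime
  obtain ⟨⟨_, hle⟩, _⟩ := hpre
  have hsw : (10 : Int) - (((10 - switch).toNat : Nat) : Int) = switch := by omega
  unfold click_mintime
  rw [show switch = 10 - (((10 - switch).toNat : Nat) : Int) from by omega]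
  rw [show ((10 : Int) - (10 - (((10 - switch).toNat : Nat) : Int))).toNat
      = (10 - switch).toNat from by omega]
  rw [clickAux_eq]
  rw [alt_eq]
  rw [show ((10 : Int) - (10 - (((10 - switch).toNat : Nat) : Int))).toNat
      = (10 - switch).toNat from by omega, hsw]
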